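-- pv_equiv track=rewrite | github.com/wimglenn/advent-of-code-wim | aoc_wim/aoc2019/q14.py | get_only_trade
-- ===== SOURCE A (Python) =====
-- def get_only_trade(have, trades):
--     options = {}
--     for elem, avail in have.items():
--         if elem == "ORE":
--             continue
--         elem_options = [(src, dst) for (src, dst) in trades if list(src) == [elem]]
--         if elem_options:
--             options[elem] = elem_options
--     if len(options) == 1:
--         [(elem, trades)] = options.items()
--         if len(trades) == 1:
--             [(src, dst)] = trades
--             return src, dst
-- ===== SOURCE B (Python) =====
-- def get_only_trade(have, trades):
--     candidates = [
--         (src, dst)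
--         for (src, dst) in trades
--         if len(list(src)) == 1 and list(src)[0] in have and list(src)[0] != "ORE"
--     ]
--     if len(candidates) == 1:
--         [(src, dst)] = candidates
--         return src, dst
--     return None
-- ===== Notes on version B (the rewrite author's own statement) =====
-- stated objective: simpler
-- what changed: Replaces A's per-element grouping pass over have (each building a filtered list of trades, then two separate singleton checks) by a single flat filter over trades selecting trades whose source has exactly one key that is a non-ORE key of have, returning the trade iff exactly one candidate exists.
import Mathlib
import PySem

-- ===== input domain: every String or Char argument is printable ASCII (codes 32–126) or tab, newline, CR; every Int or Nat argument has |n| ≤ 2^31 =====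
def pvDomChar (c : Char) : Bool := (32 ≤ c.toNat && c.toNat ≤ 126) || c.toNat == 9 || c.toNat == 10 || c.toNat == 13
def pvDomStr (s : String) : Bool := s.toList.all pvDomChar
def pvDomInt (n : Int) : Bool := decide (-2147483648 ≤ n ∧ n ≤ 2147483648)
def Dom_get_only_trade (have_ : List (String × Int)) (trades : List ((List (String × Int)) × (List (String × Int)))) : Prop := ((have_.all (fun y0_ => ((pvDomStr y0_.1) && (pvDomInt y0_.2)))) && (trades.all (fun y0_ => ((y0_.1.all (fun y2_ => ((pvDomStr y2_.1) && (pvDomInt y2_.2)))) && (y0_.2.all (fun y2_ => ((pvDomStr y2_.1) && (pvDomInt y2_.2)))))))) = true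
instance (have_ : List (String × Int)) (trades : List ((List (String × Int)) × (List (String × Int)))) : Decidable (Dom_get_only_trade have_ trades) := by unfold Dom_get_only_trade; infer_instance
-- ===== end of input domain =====

-- B replaces A's per-element grouping dict over `have` (with its two separate singleton
-- checks) by one flat filter over `trades` keeping trades whose source has exactly one key,
-- a non-ORE key of `have`; objective: simpler (one pass over trades, no grouping).


-- ===== PORT A =====
-- Python's `list(d)` for a dict d given as an assoc list: its (distinct) keys in insertion order.
def pvKeys (l : List (String × Int)) : List String := (PySem.Dict.ofList l).keys

-- A's inner comprehension `[(src, dst) for (src, dst) in trades if list(src) == [elem]]`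
def pvGroup (trades : List ((List (String × Int)) × (List (String × Int)))) (elem : String) :
    List ((List (String × Int)) × (List (String × Int))) :=
  trades.filter (fun t => pvKeys t.1 == [elem])

-- `options` is a Python dict keyed by distinct elems of `have`, so plain append is faithful
def get_only_trade (have_ : List (String × Int)) (trades : List ((List (String × Int)) × (List (String × Int)))) : Option ((List (String × Int)) × (List (String × Int))) :=
  let options : List (String × List ((List (String × Int)) × (List (String × Int)))) :=
    (PySem.Dict.ofList have_).items.foldl (fun acc p =>
      if p.1 = "ORE" then acc
      else
        let elem_options := pvGroup trades p.1
        if elem_options.isEmpty then acc else acc ++ [(p.1, elem_options)]) []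
  if options.length = 1 then
    match options with
    | [(_elem, ts)] =>
        if ts.length = 1 then
          match ts with
          | [t] => some t
          | _ => none
        else none
    | _ => none
  else none

-- ===== PORT B =====
-- `len(list(src)) == 1 and list(src)[0] in have and list(src)[0] != "ORE"`
def pvIsCandidate (have_ : List (String × Int)) (t : (List (String × Int)) × (List (String × Int))) : Bool :=
  let ks := pvKeys t.1
  ks.length == 1 &&
    (match ks with
     | k :: _ => (PySem.Dict.ofList have_).contains k && k != "ORE"
     | [] => false)

def get_only_trade_alt (have_ : List (String × Int)) (trades : List ((List (String × Int)) × (List (String × Int)))) : Option ((List (String × Int)) × (List (String × Int))) :=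
  let candidates := trades.filter (pvIsCandidate have_)
  -- `[(src, dst)] = candidates; return src, dst` under the length-1 guard is the head
  if candidates.length = 1 then candidates.head? else none

-- ===== PRECONDITION & SPEC =====
def Spec_get_only_trade (have_ : List (String × Int)) (trades : List ((List (String × Int)) × (List (String × Int)))) (out : Option ((List (String × Int)) × (List (String × Int)))) : Prop := out = get_only_trade_alt have_ trades
instance (have_ : List (String × Int)) (trades : List ((List (String × Int)) × (List (String × Int)))) (out : Option ((List (String × Int)) × (List (String × Int)))) : Decidable (Spec_get_only_trade have_ trades out) := by unfold Spec_get_only_trade; infer_instance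

-- ===== CLAIM (what is proved, stated in full; the proofs are below) =====
def Claim_equal_get_only_trade : Prop := ∀ (have_ : List (String × Int)) (trades : List ((List (String × Int)) × (List (String × Int)))), Dom_get_only_trade have_ trades → Spec_get_only_trade have_ trades (get_only_trade have_ trades)

-- ===== LEMMAS AND PROOFS =====

-- A candidate predicate in match shape, parameterised by the key list of `have`
def pvCandKs (ks : List String) (t : (List (String × Int)) × (List (String × Int))) : Bool :=
  match pvKeys t.1 with
  | [k] => ks.contains k && k != "ORE"
  | _ => false

lemma isCandidate_eq (have_ : List (String × Int)) (t : (List (String × Int)) × (List (String × Int))) :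
    pvIsCandidate have_ t = pvCandKs (pvKeys have_) t := by
  unfold pvIsCandidate pvCandKs
  cases h : pvKeys t.1 with
  | nil => simp
  | cons k rest =>
    cases rest with
    | nil =>
      have hc : ((PySem.Dict.ofList have_).contains k) = ((pvKeys have_).contains k) := by
        rw [Bool.eq_iff_iff]
        simp only [PySem.Dict.contains, pvKeys, PySem.Dict.keys, List.any_eq_true,
          List.contains_iff_mem, List.mem_map, beq_iff_eq]
      simp [hc]
    | cons k' rest' => simp

lemma countP_or_disjoint {α : Type} (p q : α → Bool) (l : List α)
    (h : ∀ x ∈ l, ¬(p x = true ∧ q x = true)) :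
    l.countP (fun x => p x || q x) = l.countP p + l.countP q := by
  induction l with
  | nil => simp
  | cons a l ih =>
    have ha := h a (by simp)
    simp only [List.countP_cons, ih (fun x hx => h x (by simp [hx]))]
    by_cases hp : p a = true <;> by_cases hq : q a = true <;> simp [hp, hq] at ha ⊢ <;> omega

lemma candKs_cons (e : String) (ks : List String) (t : (List (String × Int)) × (List (String × Int))) :
    pvCandKs (e :: ks) t = (((pvKeys t.1 == [e]) && e != "ORE") || pvCandKs ks t) := by
  unfold pvCandKs
  cases h : pvKeys t.1 with
  | nil => simp
  | cons k rest =>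
    cases rest with
    | nil =>
      by_cases hk : k = e
      · subst hk; simp
      · simp [hk]
    | cons k' rest' => simp

lemma countP_candE (trades : List ((List (String × Int)) × (List (String × Int)))) (e : String) :
    trades.countP (fun t => (pvKeys t.1 == [e]) && e != "ORE")
      = if e = "ORE" then 0 else (pvGroup trades e).length := by
  by_cases he : e = "ORE"
  · subst he; simp
  · simp only [he, if_false, pvGroup]
    rw [← List.countP_eq_length_filter]
    refine List.countP_congr ?_
    intro t _
    simp [he]

lemma sum_groups (trades : List ((List (String × Int)) × (List (String × Int)))) :
    ∀ ks : List String, ks.Nodup →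
      trades.countP (pvCandKs ks)
        = ((ks.filter (fun e => !(e == "ORE") && !(pvGroup trades e).isEmpty)).map
            (fun e => (pvGroup trades e).length)).sum := by
  intro ks hnd
  induction ks with
  | nil =>
    rw [List.countP_eq_zero.mpr]
    · simp
    · intro t _
      unfold pvCandKs
      rcases pvKeys t.1 with _ | ⟨k, _ | _⟩ <;> simp
  | cons e ks ih =>
    have he : e ∉ ks := (List.nodup_cons.mp hnd).1
    have ih' := ih (List.nodup_cons.mp hnd).2
    have hsplit : trades.countP (pvCandKs (e :: ks))
        = trades.countP (fun t => (pvKeys t.1 == [e]) && e != "ORE") + trades.countP (pvCandKs ks) := by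
      rw [List.countP_congr (q := fun t => (((pvKeys t.1 == [e]) && e != "ORE") || pvCandKs ks t))
        (fun t _ => by rw [candKs_cons])]
      apply countP_or_disjoint
      rintro t - ⟨h1, h2⟩
      unfold pvCandKs at h2
      rcases hkt : pvKeys t.1 with _ | ⟨k, _ | ⟨k', r⟩⟩ <;> rw [hkt] at h1 h2 <;> simp at h1 h2
      exact he (h1.1 ▸ h2.1)
    rw [hsplit, ih', countP_candE]
    by_cases he1 : e = "ORE"
    · simp [he1]
    · by_cases he2 : (pvGroup trades e).isEmpty
      · have : (pvGroup trades e).length = 0 := by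
          simpa [List.isEmpty_iff_length_eq_zero] using he2
        simp [he1, he2, this]
      · simp [he1, he2]

lemma options_eq (have_ : List (String × Int)) (trades : List ((List (String × Int)) × (List (String × Int)))) :
    ((PySem.Dict.ofList have_).items.foldl (fun acc p =>
      if p.1 = "ORE" then acc
      else
        let elem_options := pvGroup trades p.1
        if elem_options.isEmpty then acc else acc ++ [(p.1, elem_options)]) [])
    = ((pvKeys have_).filter (fun e => !(e == "ORE") && !(pvGroup trades e).isEmpty)).map
        (fun e => (e, pvGroup trades e)) := by
  have hfn : (fun (acc : List (String × List ((List (String × Int)) × (List (String × Int)))))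
        (p : String × Int) =>
      if p.1 = "ORE" then acc
      else
        let elem_options := pvGroup trades p.1
        if elem_options.isEmpty then acc else acc ++ [(p.1, elem_options)])
      = fun acc p => if (!(p.1 == "ORE") && !(pvGroup trades p.1).isEmpty) then
          acc ++ [(p.1, pvGroup trades p.1)] else acc := by
    funext acc p
    by_cases h1 : p.1 = "ORE" <;> by_cases h2 : (pvGroup trades p.1).isEmpty = true <;>
      simp [h1, h2]
  rw [hfn, PySem.List.foldl_append_if]
  simp only [pvKeys, PySem.Dict.keys, List.filter_map, List.map_map, List.nil_append]
  rfl

lemma length_candidates (have_ : List (String × Int)) (trades : List ((List (String × Int)) × (List (String × Int)))) :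
    (trades.filter (pvIsCandidate have_)).length
      = (((pvKeys have_).filter (fun e => !(e == "ORE") && !(pvGroup trades e).isEmpty)).map
          (fun e => (pvGroup trades e).length)).sum := by
  rw [← List.countP_eq_length_filter,
    List.countP_congr (fun t _ => by rw [isCandidate_eq]),
    sum_groups trades (pvKeys have_) (PySem.Dict.nodup_keys_ofList have_)]

lemma mem_es {have_ : List (String × Int)} {trades : List ((List (String × Int)) × (List (String × Int)))} {e : String}
    (h : e ∈ (pvKeys have_).filter (fun e => !(e == "ORE") && !(pvGroup trades e).isEmpty)) :
    e ∈ pvKeys have_ ∧ e ≠ "ORE" ∧ pvGroup trades e ≠ [] := by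
  rcases List.mem_filter.mp h with ⟨h1, h2⟩
  simp only [Bool.and_eq_true, Bool.not_eq_true', beq_eq_false_iff_ne, ne_eq,
    List.isEmpty_eq_false_iff] at h2
  exact ⟨h1, h2.1, h2.2⟩

theorem pv_final (have_ : List (String × Int)) (trades : List ((List (String × Int)) × (List (String × Int)))) :
    get_only_trade have_ trades = get_only_trade_alt have_ trades := by
  unfold get_only_trade get_only_trade_alt
  rw [options_eq]
  have hlen := length_candidates have_ trades
  rcases hE : (pvKeys have_).filter (fun e => !(e == "ORE") && !(pvGroup trades e).isEmpty) with
    _ | ⟨e, _ | ⟨e2, es''⟩⟩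
  · -- no grouped elem : both return none
    rw [hE] at hlen
    simp only [List.map_nil, List.sum_nil] at hlen
    simp only [List.map_nil, List.length_nil]
    rw [if_neg (by omega), if_neg (by omega)]
  · -- exactly one grouped elem e
    have hQ := mem_es (hE ▸ List.mem_cons_self ..)
    rw [hE] at hlen
    simp only [List.map_cons, List.map_nil, List.sum_cons, List.sum_nil, Nat.add_zero] at hlen
    rcases hg : pvGroup trades e with _ | ⟨t, _ | ⟨t2, gr⟩⟩
    · exact absurd hg hQ.2.2
    · -- e's group is the singleton [t] : both return some t
      rw [hg] at hlen
      simp only [List.length_cons, List.length_nil, Nat.zero_add] at hlen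
      obtain ⟨c, hc⟩ := List.length_eq_one_iff.mp hlen
      have ht : t ∈ trades.filter (pvIsCandidate have_) := by
        have htg : t ∈ pvGroup trades e := by rw [hg]; exact List.mem_cons_self ..
        rcases List.mem_filter.mp htg with ⟨htt, hbeq⟩
        have hkeys : pvKeys t.1 = [e] := by simpa using hbeq
        refine List.mem_filter.mpr ⟨htt, ?_⟩
        rw [isCandidate_eq]
        unfold pvCandKs
        rw [hkeys]
        simp [hQ.1, hQ.2.1]
      rw [hc] at ht
      have : t = c := by simpa using ht
      subst this
      simp [hg, hc]
    · -- e's group has two or more trades : both return none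
      rw [hg] at hlen
      simp only [List.length_cons] at hlen
      simp [hg]
      exact fun h => absurd h (by omega)
  · -- two or more grouped elems : both return none
    have hQ1 := mem_es (hE ▸ List.mem_cons_self ..)
    have hQ2 := mem_es (hE ▸ List.mem_cons_of_mem _ (List.mem_cons_self ..))
    have h1 : 1 ≤ (pvGroup trades e).length := List.length_pos_of_ne_nil hQ1.2.2
    have h2 : 1 ≤ (pvGroup trades e2).length := List.length_pos_of_ne_nil hQ2.2.2
    rw [hE] at hlen
    simp only [List.map_cons, List.sum_cons] at hlen
    simp only [List.map_cons, List.length_cons]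
    rw [if_neg (by omega), if_neg (by omega)]

-- ===== VERDICT (by name: the statement is the Claim_ definition above) =====
theorem get_only_trade_spec : Claim_equal_get_only_trade := by
  intro have_ trades _
  unfold Spec_get_only_trade
  exact pv_final have_ trades
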